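-- pv_equiv track=rewrite | github.com/rishyfishy/Python-Code | Strings/correctBrackets.py | correctBrackets
-- ===== SOURCE A (Python) =====
-- def correctBrackets(s):
--     ans = 0
--     balance = 0
--     for c in s:
--         if c=='(':
--             balance+=1
--         elif balance==0:
--             ans+=1
--         else:
--             balance-=1
--
--     return ans+balance
-- ===== SOURCE B (Python) =====
-- def correctBrackets(s):
--     r = 0
--     m = 0
--     for c in s:
--         r += 1 if c == '(' else -1
--         if r < m:
--             m = r
--     return r - 2 * m
-- ===== Notes on version B (the rewrite author's own statement) =====
-- stated objective: alternative
-- what changed: Instead of A's two clamped accumulators (unmatched-closer count and open balance), B tracks the signed running prefix sum and its minimum, returning the closed form r - 2*min.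
import Mathlib
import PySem

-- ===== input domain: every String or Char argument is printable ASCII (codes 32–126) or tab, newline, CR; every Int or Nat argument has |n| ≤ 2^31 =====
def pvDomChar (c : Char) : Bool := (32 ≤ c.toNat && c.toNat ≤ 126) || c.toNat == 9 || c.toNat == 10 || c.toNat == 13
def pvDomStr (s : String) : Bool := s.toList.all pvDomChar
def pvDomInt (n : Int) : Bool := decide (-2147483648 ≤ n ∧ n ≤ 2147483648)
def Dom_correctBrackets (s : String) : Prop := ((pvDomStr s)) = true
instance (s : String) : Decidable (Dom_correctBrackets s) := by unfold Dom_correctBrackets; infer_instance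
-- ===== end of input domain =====

-- B replaces A's two clamped accumulators with the signed prefix sum and its running minimum
-- (closed form r - 2*min); alternative algorithm, same cost, proved equal on all inputs.

-- ===== PORT A =====
-- Port of A: fold over the characters with (ans, balance); any non-'(' counts as a closer.
def stepA (p : Int × Int) (c : Char) : Int × Int :=
  if c = '(' then (p.1, p.2 + 1)
  else if p.2 = 0 then (p.1 + 1, p.2)
  else (p.1, p.2 - 1)

def correctBrackets (s : String) : Int :=
  let st := s.toList.foldl stepA (0, 0)
  st.1 + st.2

-- ===== PORT B =====
-- Port of B: signed running prefix sum r and its minimum m; answer r - 2*m.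
def stepB (p : Int × Int) (c : Char) : Int × Int :=
  let r := p.1 + (if c = '(' then 1 else -1)
  (r, if r < p.2 then r else p.2)

def correctBrackets_alt (s : String) : Int :=
  let st := s.toList.foldl stepB (0, 0)
  st.1 - 2 * st.2

-- ===== PRECONDITION & SPEC =====
def Spec_correctBrackets (s : String) (out : Int) : Prop := out = correctBrackets_alt s
instance (s : String) (out : Int) : Decidable (Spec_correctBrackets s out) := by unfold Spec_correctBrackets; infer_instance

-- ===== CLAIM (what is proved, stated in full; the proofs are below) =====
def Claim_equal_correctBrackets : Prop := ∀ (s : String), Dom_correctBrackets s → Spec_correctBrackets s (correctBrackets s)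

-- ===== LEMMAS AND PROOFS =====

-- ===== VERDICT (by name: the statement is the Claim_ definition above) =====
-- Invariant: if A's state is (-m, r-m) and B's is (r, m) with m ≤ r, the final answers agree.
theorem fold_rel (l : List Char) (r m : Int) (h : m ≤ r) :
    (l.foldl stepA (-m, r - m)).1 + (l.foldl stepA (-m, r - m)).2
      = (l.foldl stepB (r, m)).1 - 2 * (l.foldl stepB (r, m)).2 := by
  induction l generalizing r m with
  | nil => simp; ring
  | cons c t ih =>
    simp only [List.foldl_cons]
    by_cases hc : c = '('
    · have e1 : stepA (-m, r - m) c = (-m, r + 1 - m) := by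
        simp [stepA, hc]; omega
      have e2 : stepB (r, m) c = (r + 1, m) := by
        simp [stepB, hc, show ¬(r + 1 < m) from by omega]
      rw [e1, e2]; exact ih (r + 1) m (by omega)
    · by_cases hz : r - m = 0
      · have e1 : stepA (-m, r - m) c = (-(r - 1), (r - 1) - (r - 1)) := by
          simp [stepA, hc, hz]; omega
        have e2 : stepB (r, m) c = (r - 1, r - 1) := by
          simp [stepB, hc, show r + -1 < m from by omega]; omega
        rw [e1, e2]; exact ih (r - 1) (r - 1) le_rfl
      · have e1 : stepA (-m, r - m) c = (-m, (r - 1) - m) := by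
          simp [stepA, hc, hz]; omega
        have e2 : stepB (r, m) c = (r - 1, m) := by
          simp [stepB, hc, show ¬(r + -1 < m) from by omega]; omega
        rw [e1, e2]; exact ih (r - 1) m (by omega)

theorem correctBrackets_spec : Claim_equal_correctBrackets := by
  intro s _
  unfold Spec_correctBrackets correctBrackets correctBrackets_alt
  have := fold_rel s.toList 0 0 le_rfl
  simpa using this
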